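-- pv_equiv track=rewrite | github.com/Esteban-A3/Proyecto-1---Juego-2D-de-Plataformas | Ventana editor.py | calcular_puntaje_mapa
-- ===== SOURCE A (Python) =====
-- BLOQUE         = 1
--
-- ESCALERA       = 2
--
-- TRAMPA         = 3
--
-- ENEMIGO_PAT    = 4
--
-- ENEMIGO_LAN    = 5
--
-- def calcular_puntaje_mapa(matriz):
--     puntaje = 1000
--     for fila in matriz:
--         for celda in fila:
--             if celda == ENEMIGO_PAT:
--                 puntaje = puntaje + 200
--             elif celda == ENEMIGO_LAN:
--                 puntaje = puntaje + 300
--             elif celda == TRAMPA: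
--                 puntaje = puntaje + 150
--             elif celda == BLOQUE:
--                 puntaje = puntaje - 10
--             elif celda == ESCALERA:
--                 puntaje = puntaje - 20
--     if puntaje < 100:
--         puntaje = 100
--     return puntaje
-- ===== SOURCE B (Python) =====
-- BLOQUE         = 1
-- ESCALERA       = 2
-- TRAMPA         = 3
-- ENEMIGO_PAT    = 4
-- ENEMIGO_LAN    = 5
--
-- WEIGHTS = {ENEMIGO_PAT: 200, ENEMIGO_LAN: 300, TRAMPA: 150, BLOQUE: -10, ESCALERA: -20}
--
-- def calcular_puntaje_mapa(matriz):
--     cells = [celda for fila in matriz for celda in fila]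
--     total = 1000 + sum(w * cells.count(v) for v, w in WEIGHTS.items())
--     return max(100, total)
-- ===== Notes on version B (the rewrite author's own statement) =====
-- stated objective: simpler
-- what changed: Instead of branching on every cell while threading an accumulator, B flattens the matrix once and combines a fixed weight table with per-value counts (count-then-combine), clamping with max.
import Mathlib
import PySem

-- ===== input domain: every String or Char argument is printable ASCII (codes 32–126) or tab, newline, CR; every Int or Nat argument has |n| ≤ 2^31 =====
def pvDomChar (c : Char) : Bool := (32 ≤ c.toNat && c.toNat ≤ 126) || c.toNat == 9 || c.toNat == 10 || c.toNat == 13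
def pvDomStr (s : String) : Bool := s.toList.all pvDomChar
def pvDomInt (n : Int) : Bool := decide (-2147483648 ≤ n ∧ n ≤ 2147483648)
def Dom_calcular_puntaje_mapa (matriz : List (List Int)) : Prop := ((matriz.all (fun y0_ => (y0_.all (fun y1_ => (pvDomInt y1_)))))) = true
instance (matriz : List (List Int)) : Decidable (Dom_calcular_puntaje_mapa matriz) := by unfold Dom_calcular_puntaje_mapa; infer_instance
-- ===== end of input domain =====

-- ===== PORT A =====
def pvBLOQUE : Int := 1
def pvESCALERA : Int := 2
def pvTRAMPA : Int := 3
def pvENEMIGO_PAT : Int := 4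
def pvENEMIGO_LAN : Int := 5

def calcular_puntaje_mapa (matriz : List (List Int)) : Int :=
  let puntaje :=
    matriz.foldl (fun puntaje fila =>
      fila.foldl (fun puntaje celda =>
        if celda == pvENEMIGO_PAT then puntaje + 200
        else if celda == pvENEMIGO_LAN then puntaje + 300
        else if celda == pvTRAMPA then puntaje + 150
        else if celda == pvBLOQUE then puntaje - 10
        else if celda == pvESCALERA then puntaje - 20
        else puntaje) puntaje) 1000
  if puntaje < 100 then 100 else puntaje

-- ===== PORT B =====
def pvWEIGHTS : List (Int × Int) := [(4, 200), (5, 300), (3, 150), (1, -10), (2, -20)]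

-- B: flatten once, then combine the weight table with per-value counts, clamp with max.
def calcular_puntaje_mapa_alt (matriz : List (List Int)) : Int :=
  let cells := matriz.flatMap (fun fila => fila)
  let total := 1000 + (pvWEIGHTS.map (fun vw => vw.2 * (PySem.List.count cells vw.1 : Int))).sum
  max 100 total

-- ===== PRECONDITION & SPEC =====
def Spec_calcular_puntaje_mapa (matriz : List (List Int)) (out : Int) : Prop := out = calcular_puntaje_mapa_alt matriz
instance (matriz : List (List Int)) (out : Int) : Decidable (Spec_calcular_puntaje_mapa matriz out) := by unfold Spec_calcular_puntaje_mapa; infer_instance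

-- ===== CLAIM (what is proved, stated in full; the proofs are below) =====
def Claim_equal_calcular_puntaje_mapa : Prop := ∀ (matriz : List (List Int)), Dom_calcular_puntaje_mapa matriz → Spec_calcular_puntaje_mapa matriz (calcular_puntaje_mapa matriz)

-- ===== LEMMAS AND PROOFS =====

def pvStep (p celda : Int) : Int :=
  if celda == pvENEMIGO_PAT then p + 200
  else if celda == pvENEMIGO_LAN then p + 300
  else if celda == pvTRAMPA then p + 150
  else if celda == pvBLOQUE then p - 10
  else if celda == pvESCALERA then p - 20
  else p

def pvW (c : Int) : Int :=
  if c == 4 then 200 else if c == 5 then 300 else if c == 3 then 150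
  else if c == 1 then -10 else if c == 2 then -20 else 0

theorem pvStep_eq (p c : Int) : pvStep p c = p + pvW c := by
  simp only [pvStep, pvW, pvENEMIGO_PAT, pvENEMIGO_LAN, pvTRAMPA, pvBLOQUE, pvESCALERA,
    beq_iff_eq]
  split_ifs <;> omega

theorem pv_foldl_flat (matriz : List (List Int)) (p : Int) :
    matriz.foldl (fun q fila => fila.foldl pvStep q) p
      = (matriz.flatMap (fun fila => fila)).foldl pvStep p := by
  induction matriz generalizing p with
  | nil => rfl
  | cons fila rest ih => simp [List.flatMap_cons, List.foldl_append, ih]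

theorem pv_foldl_sum (cells : List Int) (p : Int) :
    cells.foldl pvStep p = p + (cells.map pvW).sum := by
  induction cells generalizing p with
  | nil => simp
  | cons c rest ih => simp [ih, pvStep_eq]; ring

theorem pv_sum_counts (cells : List Int) :
    (cells.map pvW).sum
      = 200 * (cells.count 4 : Int) + 300 * (cells.count 5 : Int)
        + 150 * (cells.count 3 : Int) + (-10) * (cells.count 1 : Int)
        + (-20) * (cells.count 2 : Int) := by
  induction cells with
  | nil => simp
  | cons c rest ih =>
    simp only [List.map_cons, List.sum_cons, ih]
    by_cases h4 : c = 4
    · subst h4; simp [pvW]; ring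
    by_cases h5 : c = 5
    · subst h5; simp [pvW]; ring
    by_cases h3 : c = 3
    · subst h3; simp [pvW]; ring
    by_cases h1 : c = 1
    · subst h1; simp [pvW]; ring
    by_cases h2 : c = 2
    · subst h2; simp [pvW]; ring
    rw [List.count_cons_of_ne h4, List.count_cons_of_ne h5, List.count_cons_of_ne h3,
        List.count_cons_of_ne h1, List.count_cons_of_ne h2]
    simp [pvW, h4, h5, h3, h1, h2]

-- ===== VERDICT (by name: the statement is the Claim_ definition above) =====
theorem calcular_puntaje_mapa_spec : Claim_equal_calcular_puntaje_mapa := by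
  intro matriz _
  unfold Spec_calcular_puntaje_mapa calcular_puntaje_mapa calcular_puntaje_mapa_alt
  show (if (matriz.foldl (fun q fila => fila.foldl pvStep q) 1000) < 100 then (100:Int)
        else matriz.foldl (fun q fila => fila.foldl pvStep q) 1000) = _
  rw [pv_foldl_flat, pv_foldl_sum, pv_sum_counts]
  simp only [pvWEIGHTS, List.map_cons, List.map_nil, List.sum_cons, List.sum_nil,
    PySem.List.count]
  rw [Int.max_def]
  split_ifs <;> omega
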